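-- pv_equiv track=rewrite | github.com/orlandomgr/practice | leetcode/py/1391_Check if There is a Valid Path in a Grid.py | hasValidPath
-- ===== SOURCE A (Python) =====
-- from typing import List
-- from collections import deque
--
-- def hasValidPath(grid: List[List[int]]) -> bool:
--     n, m = len(grid), len(grid[0])
--
--     directions = (
--         (),
--         ((0, -1), (0, 1)),   # 1: left, right
--         ((-1, 0), (1, 0)),   # 2: up, down
--         ((0, -1), (1, 0)),   # 3: left, down
--         ((0, 1), (1, 0)),    # 4: right, down
--         ((0, -1), (-1, 0)),  # 5: left, up
--         ((0, 1), (-1, 0))    # 6: right, up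
--     )
--
--     queue = deque([(0, 0)])
--     visited = {(0, 0)}
--
--     while queue:
--         r, c = queue.popleft()
--         if r == n - 1 and c == m - 1:
--             return True
--
--         for dr, dc in directions[grid[r][c]]:
--             nr, nc = r + dr, c + dc
--             if 0 <= nr < n and 0 <= nc < m and (nr, nc) not in visited:
--                 # Check if the next cell connects back
--                 if (-dr, -dc) in directions[grid[nr][nc]]:
--                     visited.add((nr, nc))
--                     queue.append((nr, nc))
--
--     return False
--
-- grid = [[1,1,2]]
-- ===== SOURCE B (Python) =====
-- from typing import List
--
-- def hasValidPath(grid: List[List[int]]) -> bool: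
--     n, m = len(grid), len(grid[0])
--
--     directions = (
--         (),
--         ((0, -1), (0, 1)),   # 1: left, right
--         ((-1, 0), (1, 0)),   # 2: up, down
--         ((0, -1), (1, 0)),   # 3: left, down
--         ((0, 1), (1, 0)),    # 4: right, down
--         ((0, -1), (-1, 0)),  # 5: left, up
--         ((0, 1), (-1, 0))    # 6: right, up
--     )
--
--     # connected-component labeling: each cell starts as its own representative;
--     # every mutual street connection merges the two components (flat union).
--     label = {(r, c): (r, c) for r in range(n) for c in range(m)}
--     for r in range(n):
--         for c in range(m):
--             for dr, dc in directions[grid[r][c]]: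
--                 nr, nc = r + dr, c + dc
--                 if 0 <= nr < n and 0 <= nc < m and (-dr, -dc) in directions[grid[nr][nc]]:
--                     a, b = label[(r, c)], label[(nr, nc)]
--                     if a != b:
--                         for k in label:
--                             if label[k] == a:
--                                 label[k] = b
--     return label[(0, 0)] == label[(n - 1, m - 1)]
-- ===== Notes on version B (the rewrite author's own statement) =====
-- stated objective: alternative
-- what changed: Replaces A's BFS with a queue and visited set by connected-component labeling (flat union-find): every mutual street connection merges the two cells' component labels, and the answer is whether start and end carry the same label.
-- outside the precondition, e.g. on hasValidPath([[3, 7]]): A returns False, B raises IndexError; on hasValidPath([[1, 1], [2]]): A returns False, B raises IndexError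
import Mathlib
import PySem

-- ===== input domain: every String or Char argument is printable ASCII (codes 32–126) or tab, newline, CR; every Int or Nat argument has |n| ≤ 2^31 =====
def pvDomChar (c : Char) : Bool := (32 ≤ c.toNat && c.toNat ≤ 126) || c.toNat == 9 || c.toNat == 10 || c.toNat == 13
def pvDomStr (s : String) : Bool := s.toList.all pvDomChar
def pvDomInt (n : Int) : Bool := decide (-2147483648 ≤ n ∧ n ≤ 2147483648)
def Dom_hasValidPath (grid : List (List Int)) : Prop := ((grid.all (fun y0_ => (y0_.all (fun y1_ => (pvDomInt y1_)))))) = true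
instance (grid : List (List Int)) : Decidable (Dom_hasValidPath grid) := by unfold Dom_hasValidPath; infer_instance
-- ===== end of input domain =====

-- B replaces A's BFS (queue + visited set) by connected-component labeling (flat union-find over a
-- cell → representative dict): a genuinely different algorithm of the same answer, not claimed faster.

-- ===== PORT A =====
-- the shared `directions` tuple of both Pythons
def pvDirTable : List (List (Int × Int)) :=
  [[], [(0, -1), (0, 1)], [(-1, 0), (1, 0)], [(0, -1), (1, 0)],
   [(0, 1), (1, 0)], [(0, -1), (-1, 0)], [(0, 1), (-1, 0)]]

-- directions[grid[r][c]]: pyGet? gives Python's indexing (incl. negative wraparound on the tuple);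
-- the .getD defaults are never reached at the positions either Python evaluates under Pre_.
def pvDirsAt (grid : List (List Int)) (r c : Int) : List (Int × Int) :=
  (PySem.List.pyGet? pvDirTable
    ((PySem.List.pyGet? ((PySem.List.pyGet? grid r).getD []) c).getD 0)).getD []

-- body of A's `for dr, dc in directions[grid[r][c]]` loop (state: queue × visited)
def pvBFSStep (grid : List (List Int)) (n m : Int) (p : Int × Int)
    (st : List (Int × Int) × PySem.Set (Int × Int)) (d : Int × Int) :
    List (Int × Int) × PySem.Set (Int × Int) :=
  let q := (p.1 + d.1, p.2 + d.2)
  if (0 ≤ q.1 ∧ q.1 < n ∧ 0 ≤ q.2 ∧ q.2 < m) ∧ q ∉ st.2 ∧ (-d.1, -d.2) ∈ pvDirsAt grid q.1 q.2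
  then (st.1 ++ [q], PySem.Set.add st.2 q)
  else st

-- A's `while queue` loop; fuel n*m+1 bounds the iteration count (each cell is enqueued at most
-- once), proved sufficient below — the fuel-0 branch is never reached under Pre_.
def pvBFS (grid : List (List Int)) (n m : Int) :
    Nat → List (Int × Int) → PySem.Set (Int × Int) → Bool
  | 0, _, _ => false
  | _ + 1, [], _ => false
  | fuel + 1, p :: queue, visited =>
    if p.1 = n - 1 ∧ p.2 = m - 1 then true
    else
      let st := (pvDirsAt grid p.1 p.2).foldl (pvBFSStep grid n m p) (queue, visited)
      pvBFS grid n m fuel st.1 st.2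

def hasValidPath (grid : List (List Int)) : Bool :=
  let n : Int := grid.length
  let m : Int := ((PySem.List.pyGet? grid 0).getD []).length
  pvBFS grid n m (n.toNat * m.toNat + 1) [((0 : Int), (0 : Int))]
    (PySem.Set.ofList [((0 : Int), (0 : Int))])

-- ===== PORT B =====
-- label[k] (KeyError impossible under Pre_: all looked-up keys are present)
def pvLook (d : PySem.Dict (Int × Int) (Int × Int)) (k : Int × Int) : Int × Int :=
  (PySem.Dict.get? d k).getD k

-- `for k in label: if label[k] == a: label[k] = b` — in-place value updates over dict iteration
def pvMerge (d : PySem.Dict (Int × Int) (Int × Int)) (a b : Int × Int) :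
    PySem.Dict (Int × Int) (Int × Int) :=
  PySem.Dict.mk (d.items.map (fun kv => (kv.1, if kv.2 = a then b else kv.2)))

-- body of B's innermost loop: one candidate street connection out of (r, c)
def pvUnionStep (grid : List (List Int)) (n m : Int)
    (d : PySem.Dict (Int × Int) (Int × Int)) (r c dr dc : Int) :
    PySem.Dict (Int × Int) (Int × Int) :=
  let nr := r + dr
  let nc := c + dc
  if (0 ≤ nr ∧ nr < n ∧ 0 ≤ nc ∧ nc < m) ∧ (-dr, -dc) ∈ pvDirsAt grid nr nc then
    let a := pvLook d (r, c)
    let b := pvLook d (nr, nc)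
    if a ≠ b then pvMerge d a b else d
  else d

def hasValidPath_alt (grid : List (List Int)) : Bool :=
  let n : Int := grid.length
  let m : Int := ((PySem.List.pyGet? grid 0).getD []).length
  -- dict comprehension {(r,c): (r,c) …}; its keys are pairwise distinct, so Dict.mk is exact
  let label0 : PySem.Dict (Int × Int) (Int × Int) :=
    PySem.Dict.mk ((PySem.List.pyRange 0 n 1).flatMap (fun r =>
      (PySem.List.pyRange 0 m 1).map (fun c => ((r, c), (r, c)))))
  let final := (PySem.List.pyRange 0 n 1).foldl (fun d r =>
    (PySem.List.pyRange 0 m 1).foldl (fun d c =>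
      (pvDirsAt grid r c).foldl (fun d dir => pvUnionStep grid n m d r c dir.1 dir.2) d) d) label0
  pvLook final (0, 0) == pvLook final (n - 1, m - 1)

-- ===== PRECONDITION & SPEC =====
-- Pre_ excludes grids that are empty or have an empty first row, rows shorter than the first row,
-- or a cell value outside -7..6 in the first len(grid[0]) columns: on these A raises (IndexError)
-- or — when the offending row/value is unreachable from the start — A returns False while B's
-- whole-grid scan raises, so no common value exists to claim.
def Pre_hasValidPath (grid : List (List Int)) : Prop :=
  grid ≠ [] ∧ 0 < (grid.head?.getD []).length ∧
  ∀ row ∈ grid, (grid.head?.getD []).length ≤ row.length ∧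
    ∀ v ∈ row.take (grid.head?.getD []).length, -7 ≤ v ∧ v ≤ 6

instance (grid : List (List Int)) : Decidable (Pre_hasValidPath grid) := by
  unfold Pre_hasValidPath; infer_instance

def pvWitness_hasValidPath : List (List Int) := [[4, 3]]

def Spec_hasValidPath (grid : List (List Int)) (out : Bool) : Prop := out = hasValidPath_alt grid
instance (grid : List (List Int)) (out : Bool) : Decidable (Spec_hasValidPath grid out) := by
  unfold Spec_hasValidPath; infer_instance

-- ===== CLAIM (what is proved, stated in full; the proofs are below) =====
def Claim_equal_hasValidPath : Prop := ∀ (grid : List (List Int)), Dom_hasValidPath grid →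
  Pre_hasValidPath grid → Spec_hasValidPath grid (hasValidPath grid)


-- ===== LEMMAS AND PROOFS =====

lemma egT {α : Type} {E : α → α → Prop} {a b c : α} (h : Relation.EqvGen E a b)
    (g : Relation.EqvGen E b c) : Relation.EqvGen E a c := Relation.EqvGen.trans a b c h g

lemma egS {α : Type} {E : α → α → Prop} {a b : α} (h : Relation.EqvGen E a b) :
    Relation.EqvGen E b a := Relation.EqvGen.symm a b h

-- the common semantic ground both ports are reduced to: reachability through mutual connections
def pvInB (n m : Int) (p : Int × Int) : Prop := 0 ≤ p.1 ∧ p.1 < n ∧ 0 ≤ p.2 ∧ p.2 < m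

def pvAdj (grid : List (List Int)) (n m : Int) (p q : Int × Int) : Prop :=
  pvInB n m p ∧ ∃ d ∈ pvDirsAt grid p.1 p.2,
    q = (p.1 + d.1, p.2 + d.2) ∧ pvInB n m q ∧ (-d.1, -d.2) ∈ pvDirsAt grid q.1 q.2

def pvCells (n m : Int) : List (Int × Int) :=
  (PySem.List.pyRange 0 n 1).flatMap (fun r => (PySem.List.pyRange 0 m 1).map (fun c => (r, c)))

lemma mem_pvCells {n m : Int} {p : Int × Int} : p ∈ pvCells n m ↔ pvInB n m p := by
  obtain ⟨a, b⟩ := p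
  simp [pvCells, pvInB, List.mem_flatMap, PySem.List.mem_pyRange_one]
  tauto

lemma length_pvCells (n m : Int) : (pvCells n m).length = n.toNat * m.toNat := by
  simp [pvCells, List.length_flatMap, PySem.List.length_pyRange_one]

lemma pvAdj_symm (grid : List (List Int)) (n m : Int) : Symmetric (pvAdj grid n m) := by
  rintro ⟨p1, p2⟩ ⟨q1, q2⟩ ⟨hp, d, hd, heq, hq, hmut⟩
  have h1 : q1 = p1 + d.1 := congrArg Prod.fst heq
  have h2 : q2 = p2 + d.2 := congrArg Prod.snd heq
  refine ⟨hq, (-d.1, -d.2), hmut, ?_, hp, by simpa using hd⟩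
  simp only [Prod.mk.injEq]
  omega

-- ---- A side: the BFS explores exactly the connected component of the start cell ----

lemma pvBFS_fold (grid : List (List Int)) (n m : Int) (p : Int × Int) :
    ∀ (ds : List (Int × Int)) (q0 v0 : List (Int × Int)),
    ∃ new : List (Int × Int),
      ds.foldl (pvBFSStep grid n m p) (q0, v0) = (q0 ++ new, v0 ++ new) ∧
      new.Nodup ∧
      (∀ x ∈ new, x ∉ v0 ∧ ∃ d ∈ ds, x = (p.1 + d.1, p.2 + d.2) ∧ pvInB n m x ∧
        (-d.1, -d.2) ∈ pvDirsAt grid x.1 x.2) ∧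
      (∀ d ∈ ds, pvInB n m (p.1 + d.1, p.2 + d.2) →
        (-d.1, -d.2) ∈ pvDirsAt grid (p.1 + d.1) (p.2 + d.2) →
        (p.1 + d.1, p.2 + d.2) ∈ v0 ++ new) := by
  intro ds
  induction ds with
  | nil => intro q0 v0; exact ⟨[], by simp, by simp, by simp, by simp⟩
  | cons d ds ih =>
    intro q0 v0
    set q : Int × Int := (p.1 + d.1, p.2 + d.2) with hq
    by_cases hC : (0 ≤ q.1 ∧ q.1 < n ∧ 0 ≤ q.2 ∧ q.2 < m) ∧ q ∉ v0 ∧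
        (-d.1, -d.2) ∈ pvDirsAt grid q.1 q.2
    · have hstep : pvBFSStep grid n m p (q0, v0) d = (q0 ++ [q], v0 ++ [q]) := by
        simp only [pvBFSStep]
        rw [if_pos hC]
        exact Prod.ext rfl (by rw [← hq, PySem.Set.add_of_not_mem hC.2.1])
      obtain ⟨new', heq, hnd, hprops, hclose⟩ := ih (q0 ++ [q]) (v0 ++ [q])
      refine ⟨q :: new', ?_, ?_, ?_, ?_⟩
      · rw [List.foldl_cons, hstep, heq]; simp
      · refine List.Nodup.cons ?_ hnd
        intro hmem
        exact ((hprops q hmem).1) (by simp)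
      · intro x hx
        rcases List.mem_cons.mp hx with rfl | hx'
        · exact ⟨hC.2.1, d, by simp, rfl, hC.1, hC.2.2⟩
        · obtain ⟨hnv, d', hd', rest⟩ := hprops x hx'
          exact ⟨fun h => hnv (by simp [h]), d', by simp [hd'], rest⟩
      · intro d'' hd'' hb hm
        rcases List.mem_cons.mp hd'' with rfl | hd''
        · simp [← hq]
        · have := hclose d'' hd'' hb hm
          simpa using this
    · have hstep : pvBFSStep grid n m p (q0, v0) d = (q0, v0) := by
        simp only [pvBFSStep]
        rw [if_neg hC]
      obtain ⟨new, heq, hnd, hprops, hclose⟩ := ih q0 v0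
      refine ⟨new, by rw [List.foldl_cons, hstep]; exact heq, hnd, ?_, ?_⟩
      · intro x hx
        obtain ⟨hnv, d', hd', rest⟩ := hprops x hx
        exact ⟨hnv, d', by simp [hd'], rest⟩
      · intro d'' hd'' hb hm
        rcases List.mem_cons.mp hd'' with rfl | hd''
        · have hqv : q ∈ v0 := by
            by_contra hqnv
            exact hC ⟨hb, hqnv, hm⟩
          exact List.mem_append.mpr (Or.inl hqv)
        · exact hclose d'' hd'' hb hm

lemma pvBFS_iff (grid : List (List Int)) (n m : Int) :
    ∀ (fuel : Nat) (queue visited : List (Int × Int)),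
    (∀ x ∈ queue, x ∈ visited) →
    (((0 : Int), (0 : Int)) ∈ visited) →
    (∀ v ∈ visited, Relation.ReflTransGen (pvAdj grid n m) (0, 0) v) →
    (∀ v ∈ visited, v ∉ queue → ∀ w, pvAdj grid n m v w → w ∈ visited) →
    (((n - 1, m - 1) : Int × Int) ∈ visited → ((n - 1, m - 1) : Int × Int) ∈ queue) →
    visited.Nodup →
    (∀ v ∈ visited, pvInB n m v) →
    queue.length + (n.toNat * m.toNat - visited.length) < fuel →
    (pvBFS grid n m fuel queue visited = true ↔
      Relation.ReflTransGen (pvAdj grid n m) (0, 0) (n - 1, m - 1)) := by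
  intro fuel
  induction fuel with
  | zero =>
    intro queue visited _ _ _ _ _ _ _ hfuel
    exact absurd hfuel (Nat.not_lt_zero _)
  | succ fuel ih =>
    intro queue visited hqv h0 hvr hclosed hend hvnd hvb hfuel
    cases queue with
    | nil =>
      have hnr : ¬ Relation.ReflTransGen (pvAdj grid n m) (0, 0) (n - 1, m - 1) := by
        intro hr
        have hall : ∀ v, Relation.ReflTransGen (pvAdj grid n m) (0, 0) v → v ∈ visited := by
          intro v hv
          induction hv with
          | refl => exact h0
          | tail h1 h2 ihh => exact hclosed _ ihh (by simp) _ h2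
        simpa using hend (hall _ hr)
      simp only [pvBFS]
      exact iff_of_false (by simp) hnr
    | cons p rest =>
      by_cases hcond : p.1 = n - 1 ∧ p.2 = m - 1
      · have hp : p = ((n - 1 : Int), (m - 1 : Int)) := Prod.ext hcond.1 hcond.2
        have hreach : Relation.ReflTransGen (pvAdj grid n m) (0, 0) (n - 1, m - 1) := by
          rw [← hp]; exact hvr p (hqv p (List.mem_cons_self ..))
        simp only [pvBFS]
        rw [if_pos hcond]
        exact iff_of_true rfl hreach
      · obtain ⟨new, heq, hnd, hprops, hclose⟩ :=
          pvBFS_fold grid n m p (pvDirsAt grid p.1 p.2) rest visited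
        have hpvis : p ∈ visited := hqv p (List.mem_cons_self ..)
        have hpB : pvInB n m p := hvb p hpvis
        have hvb' : ∀ v ∈ visited ++ new, pvInB n m v := by
          intro v hv
          rcases List.mem_append.mp hv with h | h
          · exact hvb v h
          · obtain ⟨d, hd, _, hb, _⟩ := (hprops v h).2
            exact hb
        have hcard : (visited ++ new).length ≤ n.toNat * m.toNat := by
          have hnodup : (visited ++ new).Nodup :=
            List.Nodup.append hvnd hnd
              (List.disjoint_right.mpr (fun x hx => (hprops x hx).1))
          have hsub : (visited ++ new) ⊆ pvCells n m := by
            intro x hx; exact mem_pvCells.mpr (hvb' x hx)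
          have := (hnodup.subperm hsub).length_le
          simpa [length_pvCells] using this
        simp only [pvBFS]
        rw [if_neg hcond, heq]
        apply ih
        · intro x hx
          rcases List.mem_append.mp hx with h | h
          · exact List.mem_append.mpr (Or.inl (hqv x (List.mem_cons_of_mem _ h)))
          · exact List.mem_append.mpr (Or.inr h)
        · exact List.mem_append.mpr (Or.inl h0)
        · intro v hv
          rcases List.mem_append.mp hv with h | h
          · exact hvr v h
          · obtain ⟨d, hd, hxeq, hb, hmut⟩ := (hprops v h).2
            exact Relation.ReflTransGen.tail (hvr p hpvis) ⟨hpB, d, hd, hxeq, hb, hmut⟩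
        · intro v hv hvnq w hadj
          rcases List.mem_append.mp hv with h | h
          · by_cases hvp : v = p
            · subst hvp
              obtain ⟨_, d, hd, hweq, hb, hmut⟩ := hadj
              rw [hweq] at hmut ⊢
              exact hclose d hd (hweq ▸ hb) hmut
            · have hvnrest : v ∉ rest := fun hr => hvnq (List.mem_append.mpr (Or.inl hr))
              have : v ∉ p :: rest := by
                intro hc; rcases List.mem_cons.mp hc with h' | h'
                · exact hvp h'
                · exact hvnrest h'
              exact List.mem_append.mpr (Or.inl (hclosed v h this w hadj))
          · exact absurd (List.mem_append.mpr (Or.inr h)) hvnq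
        · intro hv
          rcases List.mem_append.mp hv with h | h
          · have := hend h
            rcases List.mem_cons.mp this with h' | h'
            · exact absurd ⟨congrArg Prod.fst h'.symm, congrArg Prod.snd h'.symm⟩ hcond
            · exact List.mem_append.mpr (Or.inl h')
          · exact List.mem_append.mpr (Or.inr h)
        · exact List.Nodup.append hvnd hnd
            (List.disjoint_right.mpr (fun x hx => (hprops x hx).1))
        · exact hvb'
        · have hlen := hcard
          simp only [List.length_append] at hlen ⊢
          simp only [List.length_cons] at hfuel
          omega

lemma A_iff (grid : List (List Int)) (hpre : Pre_hasValidPath grid) :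
    (hasValidPath grid = true ↔
      Relation.ReflTransGen
        (pvAdj grid grid.length (((PySem.List.pyGet? grid 0).getD []).length)) (0, 0)
        ((grid.length : Int) - 1, (((PySem.List.pyGet? grid 0).getD []).length : Int) - 1)) := by
  obtain ⟨hne, hm0, hrows⟩ := hpre
  have hn : (0 : Int) < grid.length := by
    cases grid with
    | nil => exact absurd rfl hne
    | cons g t => simp
  have hm : (0 : Int) < ((PySem.List.pyGet? grid 0).getD []).length := by
    cases grid with
    | nil => exact absurd rfl hne
    | cons g t => simpa [PySem.List.pyGet?_zero_cons] using hm0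
  simp only [hasValidPath]
  have hset : PySem.Set.ofList [((0 : Int), (0 : Int))] = [((0 : Int), (0 : Int))] := rfl
  rw [hset]
  apply pvBFS_iff
  · intro x hx; exact hx
  · simp
  · intro v hv
    rcases List.mem_singleton.mp hv with rfl
    exact Relation.ReflTransGen.refl
  · intro v hv hnv w hadj
    exact absurd hv hnv
  · exact id
  · simp
  · intro v hv
    rcases List.mem_singleton.mp hv with rfl
    exact ⟨le_refl 0, hn, le_refl 0, hm⟩
  · simp only [List.length_cons, List.length_nil]
    have h1 : 1 ≤ (grid.length : Int).toNat := by omega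
    have h2 : 1 ≤ (((PySem.List.pyGet? grid 0).getD []).length : Int).toNat := by omega
    have := Nat.mul_le_mul h1 h2
    omega

-- ---- B side: the labeling decides the equivalence closure of the connection edges ----

def pvCand (grid : List (List Int)) (n m : Int) : List ((Int × Int) × (Int × Int)) :=
  (pvCells n m).flatMap (fun p => (pvDirsAt grid p.1 p.2).map (fun dir => (p, dir)))

def pvEOf (grid : List (List Int)) (n m : Int) (P : List ((Int × Int) × (Int × Int)))
    (u v : Int × Int) : Prop :=
  ∃ pd ∈ P, (pvInB n m (pd.1.1 + pd.2.1, pd.1.2 + pd.2.2) ∧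
      (-pd.2.1, -pd.2.2) ∈ pvDirsAt grid (pd.1.1 + pd.2.1) (pd.1.2 + pd.2.2)) ∧
    u = pd.1 ∧ v = (pd.1.1 + pd.2.1, pd.1.2 + pd.2.2)

def pvTab (l : List (Int × Int)) (F : Int × Int → Int × Int) :
    PySem.Dict (Int × Int) (Int × Int) :=
  PySem.Dict.mk (l.map (fun x => (x, F x)))

lemma get_pvTab (l : List (Int × Int)) (F : Int × Int → Int × Int) (k : Int × Int)
    (hk : k ∈ l) : PySem.Dict.get? (pvTab l F) k = some (F k) := by
  induction l with
  | nil => simp at hk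
  | cons x xs ih =>
    rcases List.mem_cons.mp hk with rfl | hk'
    · simp [pvTab, PySem.Dict.get?_mk_cons]
    · by_cases hxk : x = k
      · subst hxk; simp [pvTab, PySem.Dict.get?_mk_cons]
      · simpa [pvTab, PySem.Dict.get?_mk_cons, hxk] using ih hk'

lemma pvLook_pvTab (l : List (Int × Int)) (F : Int × Int → Int × Int) (k : Int × Int)
    (hk : k ∈ l) : pvLook (pvTab l F) k = F k := by
  simp [pvLook, get_pvTab l F k hk]

lemma pvMerge_pvTab (l : List (Int × Int)) (F : Int × Int → Int × Int) (a b : Int × Int) :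
    pvMerge (pvTab l F) a b = pvTab l (fun x => if F x = a then b else F x) := by
  simp [pvMerge, pvTab, List.map_map, Function.comp]

lemma eqvGen_congr {α : Type} {E E' : α → α → Prop} (h : ∀ a b, E a b ↔ E' a b)
    {u v : α} : Relation.EqvGen E u v ↔ Relation.EqvGen E' u v :=
  ⟨Relation.EqvGen.mono (fun a b => (h a b).1), Relation.EqvGen.mono (fun a b => (h a b).2)⟩

lemma eqvGen_nil {α : Type} {u v : α} (E : α → α → Prop) (hE : ∀ a b, ¬ E a b) :
    Relation.EqvGen E u v ↔ u = v := by
  constructor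
  · intro h
    induction h with
    | rel a b hab => exact absurd hab (hE a b)
    | refl => rfl
    | symm a b _ ih => exact ih.symm
    | trans a b c _ _ ih1 ih2 => exact ih1.trans ih2
  · rintro rfl; exact Relation.EqvGen.refl u

lemma eqvGen_union {α : Type} (E : α → α → Prop) (p q u v : α) :
    Relation.EqvGen (fun a b => E a b ∨ (a = p ∧ b = q)) u v ↔
      (Relation.EqvGen E u v ∨ (Relation.EqvGen E u p ∧ Relation.EqvGen E q v) ∨
        (Relation.EqvGen E u q ∧ Relation.EqvGen E p v)) := by
  constructor
  · intro h
    induction h with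
    | rel a b hab =>
      rcases hab with hab | ⟨rfl, rfl⟩
      · exact Or.inl (Relation.EqvGen.rel _ _ hab)
      · exact Or.inr (Or.inl ⟨Relation.EqvGen.refl _, Relation.EqvGen.refl _⟩)
    | refl => exact Or.inl (Relation.EqvGen.refl _)
    | symm a b _ ih =>
      rcases ih with h | ⟨h1, h2⟩ | ⟨h1, h2⟩
      · exact Or.inl (egS h)
      · exact Or.inr (Or.inr ⟨egS h2, egS h1⟩)
      · exact Or.inr (Or.inl ⟨egS h2, egS h1⟩)
    | trans a b c _ _ ih1 ih2 =>
      rcases ih1 with h | ⟨h1, h2⟩ | ⟨h1, h2⟩ <;> rcases ih2 with g | ⟨g1, g2⟩ | ⟨g1, g2⟩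
      · exact Or.inl (egT h g)
      · exact Or.inr (Or.inl ⟨egT h g1, g2⟩)
      · exact Or.inr (Or.inr ⟨egT h g1, g2⟩)
      · exact Or.inr (Or.inl ⟨h1, egT h2 g⟩)
      · exact Or.inr (Or.inl ⟨h1, g2⟩)
      · exact Or.inl (egT h1 g2)
      · exact Or.inr (Or.inr ⟨h1, egT h2 g⟩)
      · exact Or.inl (egT h1 g2)
      · exact Or.inr (Or.inr ⟨h1, g2⟩)
  · have lift : ∀ a b : α, Relation.EqvGen E a b →
        Relation.EqvGen (fun a b => E a b ∨ (a = p ∧ b = q)) a b :=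
      fun a b h => h.mono (fun x y hxy => Or.inl hxy)
    have edge : Relation.EqvGen (fun a b => E a b ∨ (a = p ∧ b = q)) p q :=
      Relation.EqvGen.rel p q (Or.inr ⟨rfl, rfl⟩)
    rintro (h | ⟨h1, h2⟩ | ⟨h1, h2⟩)
    · exact lift _ _ h
    · exact egT (egT (lift _ _ h1) edge) (lift _ _ h2)
    · exact egT (egT (lift _ _ h1) (egS edge)) (lift _ _ h2)

lemma eqvGen_union_absorb {α : Type} (E : α → α → Prop) (p q u v : α)
    (hpq : Relation.EqvGen E p q) :
    Relation.EqvGen (fun a b => E a b ∨ (a = p ∧ b = q)) u v ↔ Relation.EqvGen E u v := by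
  rw [eqvGen_union]
  constructor
  · rintro (h | ⟨h1, h2⟩ | ⟨h1, h2⟩)
    · exact h
    · exact egT (egT h1 hpq) h2
    · exact egT (egT h1 (egS hpq)) h2
  · exact Or.inl

lemma merge_eq_iff (a b x y : Int × Int) (hab : a ≠ b) :
    ((if x = a then b else x) = (if y = a then b else y)) ↔
      (x = y ∨ (x = a ∧ y = b) ∨ (x = b ∧ y = a)) := by
  by_cases hx : x = a <;> by_cases hy : y = a <;> simp [hx, hy] <;> tauto

def pvGood (grid : List (List Int)) (n m : Int) (P : List ((Int × Int) × (Int × Int)))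
    (d : PySem.Dict (Int × Int) (Int × Int)) : Prop :=
  ∃ F : Int × Int → Int × Int, d = pvTab (pvCells n m) F ∧
    ∀ u v : Int × Int, u ∈ pvCells n m → v ∈ pvCells n m →
      (F u = F v ↔ Relation.EqvGen (pvEOf grid n m P) u v)

lemma pvEOf_append (grid : List (List Int)) (n m : Int)
    (P : List ((Int × Int) × (Int × Int))) (e : (Int × Int) × (Int × Int)) (u v : Int × Int) :
    pvEOf grid n m (P ++ [e]) u v ↔ pvEOf grid n m P u v ∨
      ((pvInB n m (e.1.1 + e.2.1, e.1.2 + e.2.2) ∧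
        (-e.2.1, -e.2.2) ∈ pvDirsAt grid (e.1.1 + e.2.1) (e.1.2 + e.2.2)) ∧
       u = e.1 ∧ v = (e.1.1 + e.2.1, e.1.2 + e.2.2)) := by
  simp [pvEOf, List.mem_append, or_and_right, exists_or]

lemma pvFold_good (grid : List (List Int)) (n m : Int) :
    ∀ L : List ((Int × Int) × (Int × Int)),
    (∀ pd ∈ L, pd.1 ∈ pvCells n m) →
    pvGood grid n m L
      (L.foldl (fun d pd => pvUnionStep grid n m d pd.1.1 pd.1.2 pd.2.1 pd.2.2)
        (pvTab (pvCells n m) id)) := by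
  intro L
  induction L using List.reverseRecOn with
  | nil =>
    intro _
    refine ⟨id, rfl, ?_⟩
    intro u v _ _
    rw [eqvGen_nil _ (by simp [pvEOf])]
    exact Iff.rfl
  | append_singleton L e ihL =>
    intro hsrc
    have hsrcL : ∀ pd ∈ L, pd.1 ∈ pvCells n m :=
      fun pd hpd => hsrc pd (List.mem_append.mpr (Or.inl hpd))
    obtain ⟨F, hdF, hiff⟩ := ihL hsrcL
    obtain ⟨p, dir⟩ := e
    have hp : p ∈ pvCells n m := hsrc (p, dir) (by simp)
    rw [List.foldl_append]
    simp only [List.foldl_cons, List.foldl_nil]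
    rw [hdF]
    by_cases hC : (0 ≤ p.1 + dir.1 ∧ p.1 + dir.1 < n ∧ 0 ≤ p.2 + dir.2 ∧ p.2 + dir.2 < m) ∧
        (-dir.1, -dir.2) ∈ pvDirsAt grid (p.1 + dir.1) (p.2 + dir.2)
    · set q : Int × Int := (p.1 + dir.1, p.2 + dir.2) with hqdef
      have hqB : pvInB n m q := hC.1
      have hq : q ∈ pvCells n m := mem_pvCells.mpr hqB
      have hstep : pvUnionStep grid n m (pvTab (pvCells n m) F) p.1 p.2 dir.1 dir.2 =
          (if F p ≠ F q then pvMerge (pvTab (pvCells n m) F) (F p) (F q)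
           else pvTab (pvCells n m) F) := by
        simp only [pvUnionStep]
        rw [if_pos hC]
        rw [pvLook_pvTab _ _ _ hp, pvLook_pvTab _ _ _ hq]
      rw [hstep]
      have hcongr : ∀ a b : Int × Int, pvEOf grid n m (L ++ [(p, dir)]) a b ↔
          (pvEOf grid n m L a b ∨ (a = p ∧ b = q)) := by
        intro a b
        rw [pvEOf_append]
        constructor
        · rintro (h | ⟨_, h1, h2⟩)
          · exact Or.inl h
          · exact Or.inr ⟨h1, h2⟩
        · rintro (h | ⟨h1, h2⟩)
          · exact Or.inl h
          · exact Or.inr ⟨⟨hC.1, hC.2⟩, h1, h2⟩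
      by_cases hab : F p = F q
      · rw [if_neg (by simp [hab])]
        refine ⟨F, rfl, ?_⟩
        intro u v hu hv
        rw [eqvGen_congr hcongr,
          eqvGen_union_absorb _ p q u v ((hiff p q hp hq).mp hab)]
        exact hiff u v hu hv
      · rw [if_pos hab]
        rw [pvMerge_pvTab]
        refine ⟨fun x => if F x = F p then F q else F x, rfl, ?_⟩
        intro u v hu hv
        rw [eqvGen_congr hcongr, eqvGen_union]
        rw [merge_eq_iff _ _ _ _ hab]
        rw [hiff u v hu hv, hiff u p hu hp, hiff u q hu hq,
          hiff v q hv hq, hiff v p hv hp]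
        constructor
        · rintro (h | ⟨h1, h2⟩ | ⟨h1, h2⟩)
          · exact Or.inl h
          · exact Or.inr (Or.inl ⟨h1, egS h2⟩)
          · exact Or.inr (Or.inr ⟨h1, egS h2⟩)
        · rintro (h | ⟨h1, h2⟩ | ⟨h1, h2⟩)
          · exact Or.inl h
          · exact Or.inr (Or.inl ⟨h1, egS h2⟩)
          · exact Or.inr (Or.inr ⟨h1, egS h2⟩)
    · have hstep : pvUnionStep grid n m (pvTab (pvCells n m) F) p.1 p.2 dir.1 dir.2 =
          pvTab (pvCells n m) F := by
        simp only [pvUnionStep]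
        rw [if_neg hC]
      rw [hstep]
      refine ⟨F, rfl, ?_⟩
      intro u v hu hv
      have hcongr : ∀ a b : Int × Int, pvEOf grid n m (L ++ [(p, dir)]) a b ↔
          pvEOf grid n m L a b := by
        intro a b
        rw [pvEOf_append]
        constructor
        · rintro (h | ⟨hCC, _, _⟩)
          · exact h
          · exact absurd hCC hC
        · exact Or.inl
      rw [eqvGen_congr hcongr]
      exact hiff u v hu hv

lemma foldl_flatMap {α β γ : Type} (l : List α) (f : α → List β) (g : γ → β → γ) (i : γ) :
    ((l.flatMap f).foldl g i) = l.foldl (fun a x => (f x).foldl g a) i := by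
  induction l generalizing i with
  | nil => rfl
  | cons x xs ih => simp [List.flatMap_cons, List.foldl_append, ih]

lemma pvEOf_cand_iff (grid : List (List Int)) (n m : Int) (u v : Int × Int) :
    pvEOf grid n m (pvCand grid n m) u v ↔ pvAdj grid n m u v := by
  constructor
  · rintro ⟨pd, hmem, ⟨hb, hmut⟩, rfl, rfl⟩
    rcases List.mem_flatMap.mp hmem with ⟨p, hp, hpd⟩
    rcases List.mem_map.mp hpd with ⟨dir, hdir, rfl⟩
    exact ⟨mem_pvCells.mp hp, dir, hdir, rfl, hb, hmut⟩
  · rintro ⟨hu, d, hd, rfl, hb, hmut⟩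
    refine ⟨(u, d), ?_, ⟨hb, hmut⟩, rfl, rfl⟩
    exact List.mem_flatMap.mpr ⟨u, mem_pvCells.mpr hu, List.mem_map.mpr ⟨d, hd, rfl⟩⟩

lemma eqvGen_iff_rtg {α : Type} (E : α → α → Prop) (hs : Symmetric E) (u v : α) :
    Relation.EqvGen E u v ↔ Relation.ReflTransGen E u v := by
  constructor
  · intro h
    induction h with
    | rel a b hab => exact Relation.ReflTransGen.single hab
    | refl => exact Relation.ReflTransGen.refl
    | symm a b _ ih => exact Relation.ReflTransGen.symmetric hs ih
    | trans a b c _ _ ih1 ih2 => exact ih1.trans ih2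
  · intro h
    induction h with
    | refl => exact Relation.EqvGen.refl _
    | tail _ hbc ih => exact egT ih (Relation.EqvGen.rel _ _ hbc)

lemma B_iff (grid : List (List Int)) (hpre : Pre_hasValidPath grid) :
    (hasValidPath_alt grid = true ↔
      Relation.ReflTransGen
        (pvAdj grid grid.length (((PySem.List.pyGet? grid 0).getD []).length)) (0, 0)
        ((grid.length : Int) - 1, (((PySem.List.pyGet? grid 0).getD []).length : Int) - 1)) := by
  obtain ⟨hne, hm0, hrows⟩ := hpre
  have hn : (0 : Int) < grid.length := by
    cases grid with
    | nil => exact absurd rfl hne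
    | cons g t => simp
  have hm : (0 : Int) < ((PySem.List.pyGet? grid 0).getD []).length := by
    cases grid with
    | nil => exact absurd rfl hne
    | cons g t => simpa [PySem.List.pyGet?_zero_cons] using hm0
  set n : Int := (grid.length : Int) with hndef
  set m : Int := (((PySem.List.pyGet? grid 0).getD []).length : Int) with hmdef
  have hlab : PySem.Dict.mk ((PySem.List.pyRange 0 n 1).flatMap (fun r =>
      (PySem.List.pyRange 0 m 1).map (fun c => ((r, c), (r, c))))) =
      pvTab (pvCells n m) id := by
    simp only [pvTab, pvCells, List.map_flatMap, List.map_map, id]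
    rfl
  have hfold : (PySem.List.pyRange 0 n 1).foldl (fun d r =>
      (PySem.List.pyRange 0 m 1).foldl (fun d c =>
        (pvDirsAt grid r c).foldl (fun d dir => pvUnionStep grid n m d r c dir.1 dir.2) d) d)
        (pvTab (pvCells n m) id) =
      (pvCand grid n m).foldl
        (fun d pd => pvUnionStep grid n m d pd.1.1 pd.1.2 pd.2.1 pd.2.2)
        (pvTab (pvCells n m) id) := by
    rw [pvCand, foldl_flatMap]
    simp only [List.foldl_map]
    rw [pvCells, foldl_flatMap]
    simp only [List.foldl_map]
  have hsrc : ∀ pd ∈ pvCand grid n m, pd.1 ∈ pvCells n m := by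
    intro pd hpd
    rcases List.mem_flatMap.mp hpd with ⟨p, hp, hmem⟩
    rcases List.mem_map.mp hmem with ⟨dir, _, rfl⟩
    exact hp
  obtain ⟨F, hF, hiff⟩ := pvFold_good grid n m (pvCand grid n m) hsrc
  have hs : ((0 : Int), (0 : Int)) ∈ pvCells n m :=
    mem_pvCells.mpr ⟨le_refl 0, hn, le_refl 0, hm⟩
  have he : ((n - 1, m - 1) : Int × Int) ∈ pvCells n m :=
    mem_pvCells.mpr ⟨by omega, by omega, by omega, by omega⟩
  simp only [hasValidPath_alt]
  rw [← hndef, ← hmdef, hlab, hfold, hF, pvLook_pvTab _ _ _ hs, pvLook_pvTab _ _ _ he]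
  rw [beq_iff_eq]
  rw [hiff _ _ hs he]
  rw [eqvGen_congr (pvEOf_cand_iff grid n m)]
  exact eqvGen_iff_rtg _ (pvAdj_symm grid n m) _ _

-- ===== VERDICT (by name: the statement is the Claim_ definition above) =====
theorem hasValidPath_spec : Claim_equal_hasValidPath := by
  intro grid _ hpre
  unfold Spec_hasValidPath
  have h1 := A_iff grid hpre
  have h2 := B_iff grid hpre
  have : hasValidPath grid = true ↔ hasValidPath_alt grid = true := h1.trans h2.symm
  cases hA : hasValidPath grid <;> cases hB : hasValidPath_alt grid <;> simp_all
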